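-- pv_equiv track=rewrite | github.com/kue0806/tft-simulator | train_league_phase2.py | create_model_distribution
-- ===== SOURCE A (Python) =====
-- from typing import Dict, List, Optional, Any, Tuple
--
-- def create_model_distribution(
--     trained_models: Dict[str, Any],
--     training_model_name: str,
-- ) -> Dict[str, int]:
--     """
--     Create opponent distribution for 7 opponent slots.
--
--     Example:
--         If training CustomMaskedPPO with DuelingDQN and TransformerPPO available:
--         - DuelingDQN: 3 slots
--         - TransformerPPO: 3 slots
--         - (remaining slot filled by random or previous version)
--     """
--     other_models = {
--         name: model for name, model in trained_models.items()
--         if name != training_model_name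
--     }
--
--     num_opponents = 7
--     num_other_models = len(other_models)
--
--     if num_other_models == 0:
--         return {}
--
--     # Distribute evenly
--     slots_per_model = num_opponents // num_other_models
--     remainder = num_opponents % num_other_models
--
--     distribution = {}
--     for i, name in enumerate(other_models.keys()):
--         count = slots_per_model + (1 if i < remainder else 0)
--         distribution[name] = count
--
--     return distribution
-- ===== SOURCE B (Python) =====
-- def create_model_distribution(trained_models, training_model_name):
--     other_models = {
--         name: model for name, model in trained_models.items()
--         if name != training_model_name
--     }
--     if not other_models:
--         return {}
--     names = list(other_models)
--     distribution = {name: 0 for name in names}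
--     for i in range(7):
--         distribution[names[i % len(names)]] += 1
--     return distribution
-- ===== Notes on version B (the rewrite author's own statement) =====
-- stated objective: alternative
-- what changed: B drops the quotient/remainder arithmetic: it zero-initializes the distribution and assigns each of the 7 opponent slots round-robin over the other models (distribution[names[i % n]] += 1 for i in range(7)), iterating over slots instead of over models.
import Mathlib
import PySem

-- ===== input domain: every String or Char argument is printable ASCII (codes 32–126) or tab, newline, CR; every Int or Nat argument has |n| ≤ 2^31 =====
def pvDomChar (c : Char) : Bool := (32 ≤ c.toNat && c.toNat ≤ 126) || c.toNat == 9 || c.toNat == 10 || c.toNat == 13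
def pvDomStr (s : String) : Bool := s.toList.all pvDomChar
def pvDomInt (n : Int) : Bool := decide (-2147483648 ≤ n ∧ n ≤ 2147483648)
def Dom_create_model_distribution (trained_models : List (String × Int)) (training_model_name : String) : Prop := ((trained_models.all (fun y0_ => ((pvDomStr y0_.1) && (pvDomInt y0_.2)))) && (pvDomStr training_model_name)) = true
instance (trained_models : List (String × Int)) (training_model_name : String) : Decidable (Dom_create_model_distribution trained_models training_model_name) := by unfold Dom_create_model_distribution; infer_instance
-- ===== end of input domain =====

-- B assigns the 7 opponent slots round-robin over the other models ('for i in range(7): distribution[names[i % n]] += 1')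
-- instead of computing slots_per_model/remainder per model; same result, a different decomposition (objective: alternative).


-- ===== PORT A =====
def create_model_distribution (trained_models : List (String × Int)) (training_model_name : String) : List (String × Int) :=
  let other_models : PySem.Dict String Int :=
    trained_models.foldl (fun d p => if p.1 ≠ training_model_name then d.insert p.1 p.2 else d) PySem.Dict.empty
  let num_opponents : Int := 7
  let num_other_models : Int := (other_models.size : Int)
  if num_other_models = 0 then []
  else
    let slots_per_model := PySem.Int.floordiv num_opponents num_other_models
    let remainder := PySem.Int.mod num_opponents num_other_models
    let distribution : PySem.Dict String Int :=
      (PySem.List.enumerate other_models.keys 0).foldl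
        (fun d p => d.insert p.2 (slots_per_model + (if p.1 < remainder then 1 else 0))) PySem.Dict.empty
    distribution.items

-- ===== PORT B =====
def create_model_distribution_alt (trained_models : List (String × Int)) (training_model_name : String) : List (String × Int) :=
  let other_models : PySem.Dict String Int :=
    trained_models.foldl (fun d p => if p.1 ≠ training_model_name then d.insert p.1 p.2 else d) PySem.Dict.empty
  if (other_models.size : Int) = 0 then []
  else
    let names := other_models.keys
    let dist0 : PySem.Dict String Int := names.foldl (fun d nm => d.insert nm (0 : Int)) PySem.Dict.empty
    let distribution :=
      (PySem.List.pyRange 0 7 1).foldl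
        (fun d i => d.modify (PySem.List.pyGetD names (PySem.Int.mod i (names.length : Int)) "") 0 (· + 1)) dist0
    distribution.items

-- ===== PRECONDITION & SPEC =====
def Spec_create_model_distribution (trained_models : List (String × Int)) (training_model_name : String) (out : List (String × Int)) : Prop := out = create_model_distribution_alt trained_models training_model_name
instance (trained_models : List (String × Int)) (training_model_name : String) (out : List (String × Int)) : Decidable (Spec_create_model_distribution trained_models training_model_name out) := by unfold Spec_create_model_distribution; infer_instance

-- ===== CLAIM (what is proved, stated in full; the proofs are below) =====
def Claim_equal_create_model_distribution : Prop := ∀ (trained_models : List (String × Int)) (training_model_name : String), Dom_create_model_distribution trained_models training_model_name → Spec_create_model_distribution trained_models training_model_name (create_model_distribution trained_models training_model_name)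

-- ===== LEMMAS AND PROOFS =====

set_option maxHeartbeats 1600000 in
lemma rr_count (n j : Int) (hn : 0 < n) (hj0 : 0 ≤ j) (hjn : j < n) :
    (((PySem.List.pyRange 0 7 1).countP (fun i => PySem.Int.mod i n = j) : Nat) : Int) =
      PySem.Int.floordiv 7 n + (if j < PySem.Int.mod 7 n then 1 else 0) := by
  have h7 : PySem.List.pyRange 0 7 1 = [0,1,2,3,4,5,6] := by decide
  rw [h7, PySem.Int.floordiv_eq_ediv_of_pos hn, PySem.Int.mod_eq_emod_of_pos hn]
  have hm : ∀ i : Int, PySem.Int.mod i n = i % n := fun i => PySem.Int.mod_eq_emod_of_pos hn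
  simp only [List.countP_cons, List.countP_nil, hm, decide_eq_true_eq]
  rcases lt_or_ge n 8 with h | h
  · interval_cases n <;> split_ifs <;> omega
  · have e : ∀ i : Int, 0 ≤ i → i < n → i % n = i := fun i h1 h2 => Int.emod_eq_of_lt h1 h2
    rw [e 0 (by omega) (by omega), e 1 (by omega) (by omega), e 2 (by omega) (by omega),
        e 3 (by omega) (by omega), e 4 (by omega) (by omega), e 5 (by omega) (by omega),
        e 6 (by omega) (by omega), e 7 (by omega) (by omega),
        Int.ediv_eq_zero_of_lt (by omega) (by omega)]
    split_ifs <;> omega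

lemma nodup_filter_fold (tm : List (String × Int)) (t : String) (d : PySem.Dict String Int)
    (h : d.keys.Nodup) :
    (tm.foldl (fun d p => if p.1 ≠ t then d.insert p.1 p.2 else d) d).keys.Nodup := by
  induction tm generalizing d with
  | nil => exact h
  | cons p tl ih =>
      simp only [List.foldl_cons]
      split
      · exact ih _ (PySem.Dict.nodup_keys_insert d p.1 p.2 h)
      · exact ih _ h

set_option maxHeartbeats 4000000 in
lemma main_eq (tm : List (String × Int)) (t : String) :
    create_model_distribution tm t = create_model_distribution_alt tm t := by
  unfold create_model_distribution create_model_distribution_alt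
  simp only []
  set D := tm.foldl (fun d p => if p.1 ≠ t then d.insert p.1 p.2 else d) PySem.Dict.empty with hD
  have hnd : D.keys.Nodup := nodup_filter_fold tm t _ PySem.Dict.nodup_keys_empty
  by_cases h0 : (D.size : Int) = 0
  · simp [h0]
  · rw [if_neg h0, if_neg h0]
    set L := D.keys with hL
    have hn : 0 < (L.length : Int) := by
      have : D.size = L.length := by
        simp [PySem.Dict.size, PySem.Dict.keys, hL]
      omega
    rw [PySem.Dict.items_foldl_insert_fresh (PySem.List.enumerate L 0) (fun p => p.2)
          (fun p => PySem.Int.floordiv 7 (D.size : Int) + (if p.1 < PySem.Int.mod 7 (D.size : Int) then 1 else 0))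
          PySem.Dict.empty (by intro a _; exact PySem.Dict.contains_empty _)
          (by rw [PySem.List.map_snd_enumerate]; exact hnd)]
    -- B side: dist0
    have hd0items : (L.foldl (fun d nm => d.insert nm (0:Int)) PySem.Dict.empty).items
        = L.map (fun nm => (nm, (0:Int))) := by
      rw [PySem.Dict.items_foldl_insert_fresh L (fun nm => nm) (fun _ => (0:Int)) PySem.Dict.empty
            (fun a _ => PySem.Dict.contains_empty _) (by simpa using hnd)]
      rw [show (PySem.Dict.empty : PySem.Dict String Int).items = [] from rfl, List.nil_append]
    set d0 := L.foldl (fun d nm => d.insert nm (0:Int)) PySem.Dict.empty with hd0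
    have hd0keys : d0.keys = L := by
      show d0.items.map (·.1) = L
      rw [hd0items, List.map_map]; simp [Function.comp_def]
    have hd0nd : d0.keys.Nodup := by rw [hd0keys]; exact hnd
    set n : Int := (L.length : Int) with hnn
    set key : Int → String := fun i => PySem.List.pyGetD L (PySem.Int.mod i n) "" with hkey
    have hkeymem : ∀ i ∈ PySem.List.pyRange 0 7 1, key i ∈ L := by
      intro i _
      have h1 : 0 ≤ PySem.Int.mod i n := PySem.Int.mod_nonneg i (by omega)
      have h2 : PySem.Int.mod i n < n := PySem.Int.mod_lt i (by omega)
      show PySem.List.pyGetD L (PySem.Int.mod i n) "" ∈ L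
      rw [PySem.List.pyGetD_eq_getElem L "" h1 (by omega)]
      exact List.getElem_mem _
    set dist := (PySem.List.pyRange 0 7 1).foldl
        (fun d i => d.modify (key i) 0 (· + 1)) d0 with hdist
    have hdkeys : dist.keys = L := by
      rw [hdist, PySem.Dict.keys_foldl_modify_key (PySem.List.pyRange 0 7 1) key 0
            (fun _ _ => (fun v => v + 1)) d0, hd0keys, PySem.Set.update_eq_append_filter]
      have hfil : List.filter (fun y => !PySem.Set.contains L y)
          (PySem.Set.ofList ((PySem.List.pyRange 0 7 1).map key)) = [] := by
        rw [List.filter_eq_nil_iff]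
        intro a ha
        have ham : a ∈ (PySem.List.pyRange 0 7 1).map key :=
          (PySem.Set.mem_ofList (xs := (PySem.List.pyRange 0 7 1).map key) (y := a)).mp ha
        rcases List.mem_map.mp ham with ⟨i, hi, rfl⟩
        simp [PySem.Set.contains_eq_listContains, hkeymem i hi]
      rw [hfil, List.append_nil]
    have hdnd : dist.keys.Nodup := by rw [hdkeys]; exact hnd
    have hgetD : ∀ j : Nat, (hj : j < L.length) → dist.getD L[j] 0
        = ((((PySem.List.pyRange 0 7 1).countP (fun i => PySem.Int.mod i n = (j:Int)) : Nat)) : Int) := by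
      intro j hj
      rw [hdist,
          show (List.foldl (fun d i => PySem.Dict.modify d (key i) 0 (· + 1)) d0 (PySem.List.pyRange 0 7 1))
              = List.foldl (fun d x => PySem.Dict.modify d x 0 (· + 1)) d0 ((PySem.List.pyRange 0 7 1).map key) from
            (List.foldl_map (f := key) (g := fun d x => PySem.Dict.modify d x 0 (· + 1))).symm,
          PySem.Dict.getD_foldl_modify_add_one]
      have hz : d0.getD L[j] 0 = 0 :=
        PySem.Dict.getD_of_mem_items d0 (by rw [hd0items]; exact List.mem_map_of_mem (List.getElem_mem hj)) hd0nd 0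
      rw [hz, zero_add]
      congr 1
      rw [List.count_eq_countP, List.countP_map]
      refine List.countP_congr ?_
      intro i hi
      have h1 : 0 ≤ PySem.Int.mod i n := PySem.Int.mod_nonneg i (by omega)
      have h2 : PySem.Int.mod i n < n := PySem.Int.mod_lt i (by omega)
      simp only [Function.comp, hkey, PySem.List.pyGetD_eq_getElem L "" h1 (by omega),
        beq_iff_eq]
      rw [List.Nodup.getElem_inj_iff hnd]
      simp only [decide_eq_true_eq]
      omega
    have hsz : (D.size : Int) = n := by simp [PySem.Dict.size, PySem.Dict.keys, hnn, hL]
    rw [PySem.Dict.items_eq_map_keys dist hdnd 0, hdkeys,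
        show (PySem.Dict.empty : PySem.Dict String Int).items = [] from rfl, List.nil_append, hsz]
    apply List.ext_getElem
    · simp [PySem.List.length_enumerate]
    · intro j h1 h2
      rw [List.length_map] at h2
      simp only [List.getElem_map, PySem.List.getElem_enumerate, zero_add]
      rw [hgetD j h2, rr_count n (j:Int) hn (by omega) (by omega)]

-- ===== VERDICT (by name: the statement is the Claim_ definition above) =====
theorem create_model_distribution_spec : Claim_equal_create_model_distribution := by
  intro tm t _
  exact main_eq tm t
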